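-- pv_equiv track=rewrite | github.com/govi218/mathemagician | mathemagician.py | mathemagician
-- ===== SOURCE A (Python) =====
-- def get_polynomial_value_for_x(coeffs,x=0):
--     degree = len(coeffs) - 1
--     val = 0
--     for i in range(len(coeffs) - 1):
--         curr_degree = degree
--         val = val + x**curr_degree * coeffs[i]
--         degree = degree - 1
--     return val + coeffs[len(coeffs) - 1]
--
-- def mathemagician(coeffs):
--     one_val = get_polynomial_value_for_x(coeffs,1)
--     higher = get_polynomial_value_for_x(coeffs,one_val + 1)
--     poly_coeffs = ''
--     i = 0
--     while(higher > 0):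
--         poly_coeffs += '+' + str(higher % (one_val+1)) + 'x^' + str(i)
--         higher  = higher // (one_val+1)
--         i = i+1
--     return(poly_coeffs[1:])
-- ===== SOURCE B (Python) =====
-- def mathemagician(coeffs):
--     base = sum(coeffs) + 1
--     h = 0
--     for c in coeffs:
--         h = h * base + c
--     parts = []
--     i = 0
--     while h > 0:
--         parts.append(str(h % base) + 'x^' + str(i))
--         h //= base
--         i += 1
--     return '+'.join(parts)
-- ===== Notes on version B (the rewrite author's own statement) =====
-- stated objective: faster
-- what changed: Polynomial evaluation by Horner's method (single linear fold, and sum(coeffs) for P(1)) instead of recomputing x**degree from scratch for every coefficient, and the digit string is assembled by joining a list of parts instead of repeated string concatenation with a final slice.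
import Mathlib
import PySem

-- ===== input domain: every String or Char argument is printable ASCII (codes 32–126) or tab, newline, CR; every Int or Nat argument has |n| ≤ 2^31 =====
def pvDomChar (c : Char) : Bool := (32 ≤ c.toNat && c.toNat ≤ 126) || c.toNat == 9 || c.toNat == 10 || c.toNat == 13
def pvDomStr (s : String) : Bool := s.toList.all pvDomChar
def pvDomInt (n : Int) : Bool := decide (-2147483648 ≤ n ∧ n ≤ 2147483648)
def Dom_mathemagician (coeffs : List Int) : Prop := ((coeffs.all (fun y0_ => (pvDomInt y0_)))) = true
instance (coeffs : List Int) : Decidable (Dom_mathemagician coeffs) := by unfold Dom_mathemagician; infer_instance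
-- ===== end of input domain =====

-- B replaces A's O(n^2)-multiplication power-loop evaluation by Horner's method and builds the
-- digit string by joining a list of parts instead of repeated concatenation (objective: faster).


-- ===== PORT A =====
-- get_polynomial_value_for_x: loop over range(len-1) with state (degree, val).
-- x**curr_degree: curr_degree runs len-1 … 1, always ≥ 0, so Int pow on toNat is exact here.
-- coeffs[i] (i in range) and coeffs[len-1] are in range whenever coeffs ≠ [] (Pre_), so pyGetD is exact.
def pvPolyA (coeffs : List Int) (x : Int) : Int :=
  let st := (PySem.List.pyRange 0 (PySem.List.len coeffs - 1) 1).foldl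
      (fun (dv : Int × Int) i =>
        (dv.1 - 1, dv.2 + x ^ dv.1.toNat * PySem.List.pyGetD coeffs i 0)) (PySem.List.len coeffs - 1, 0)
  st.2 + PySem.List.pyGetD coeffs (PySem.List.len coeffs - 1) 0

-- the while loop of A; strings are handled as their code-point lists (exact; wrapped by String.ofList
-- at the end).  Fuel h.toNat+1 is a totality guard only: inside Pre_ the loop runs at most
-- h.toNat iterations (base ≥ 2 shrinks h, base ≤ 0 makes h negative at once, base = 1 forces h = 0).
def pvLoopA : Nat → Int → Int → Int → List Char → List Char
  | 0, _, _, _, acc => acc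
  | fuel+1, b, h, i, acc =>
    if h > 0 then
      pvLoopA fuel b (PySem.Int.floordiv h b) (i + 1)
        (acc ++ ['+'] ++ PySem.Int.toChars (PySem.Int.mod h b) ++ ['x', '^'] ++ PySem.Int.toChars i)
    else acc

def mathemagician (coeffs : List Int) : String :=
  let one_val := pvPolyA coeffs 1
  let higher := pvPolyA coeffs (one_val + 1)
  -- poly_coeffs[1:]
  String.ofList (PySem.List.slice (pvLoopA (higher.toNat + 1) (one_val + 1) higher 0 []) (some 1) none)

-- ===== PORT B =====
-- B's while loop: collects the parts in a list, joined with '+' at the end.  Same fuel guard as A's.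
def pvLoopB : Nat → Int → Int → Int → List (List Char) → List (List Char)
  | 0, _, _, _, parts => parts
  | fuel+1, b, h, i, parts =>
    if h > 0 then
      pvLoopB fuel b (PySem.Int.floordiv h b) (i + 1)
        (parts ++ [PySem.Int.toChars (PySem.Int.mod h b) ++ ['x', '^'] ++ PySem.Int.toChars i])
    else parts

def mathemagician_alt (coeffs : List Int) : String :=
  let base := coeffs.sum + 1
  let h := coeffs.foldl (fun a c => a * base + c) 0
  String.ofList (PySem.Chars.join ['+'] (pvLoopB (h.toNat + 1) base h 0 []))

-- ===== PRECONDITION & SPEC =====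
-- Pre_ excludes exactly the inputs where Python A raises: the empty list (IndexError on coeffs[-1])
-- and lists with sum -1 and positive last element (ZeroDivisionError: base is 0 and higher > 0).
def Pre_mathemagician (coeffs : List Int) : Prop :=
  coeffs ≠ [] ∧ ¬(coeffs.sum = -1 ∧ 0 < coeffs.getLastD 0)
instance (coeffs : List Int) : Decidable (Pre_mathemagician coeffs) := by
  unfold Pre_mathemagician; infer_instance

def pvWitness_mathemagician : List Int := ([1, 2])

def Spec_mathemagician (coeffs : List Int) (out : String) : Prop := out = mathemagician_alt coeffs
instance (coeffs : List Int) (out : String) : Decidable (Spec_mathemagician coeffs out) := by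
  unfold Spec_mathemagician; infer_instance

-- ===== CLAIM (what is proved, stated in full; the proofs are below) =====
def Claim_equal_mathemagician : Prop := ∀ (coeffs : List Int), Dom_mathemagician coeffs → Pre_mathemagician coeffs → Spec_mathemagician coeffs (mathemagician coeffs)

-- ===== LEMMAS AND PROOFS =====

theorem pv_horner_split (x : Int) :
    ∀ (t : List Int) (a : Int),
      t.foldl (fun a c => a * x + c) a
        = a * x ^ t.length + t.foldl (fun a c => a * x + c) 0 := by
  intro t
  induction t with
  | nil => intro a; simp
  | cons c t ih =>
    intro a
    simp only [List.foldl_cons, List.length_cons]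
    rw [ih (a * x + c), ih (0 * x + c)]
    ring

theorem pv_polyA_fold (x : Int) :
    ∀ (ys : List Int) (v d : Int), d = (ys.length : Int) →
      (ys.foldl (fun (dv : Int × Int) c => (dv.1 - 1, dv.2 + x ^ dv.1.toNat * c)) (d, v)).2
        = v + (ys.foldl (fun a c => a * x + c) 0) * x := by
  intro ys
  induction ys with
  | nil => intro v d _; simp
  | cons c t ih =>
    intro v d hd
    simp only [List.foldl_cons]
    rw [ih _ (d - 1) (by simp at hd ⊢; omega)]
    rw [pv_horner_split x t (0 * x + c)]
    have hdt : d.toNat = t.length + 1 := by simp at hd; omega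
    rw [hdt]
    ring

theorem pv_polyA_eq_horner (coeffs : List Int) (hne : coeffs ≠ []) (x : Int) :
    pvPolyA coeffs x = coeffs.foldl (fun a c => a * x + c) 0 := by
  obtain ⟨ys, z, rfl⟩ : ∃ ys z, coeffs = ys ++ [z] := by
    rcases List.eq_nil_or_concat coeffs with h | ⟨ys, z, h⟩
    · exact absurd h hne
    · exact ⟨ys, z, by simpa using h⟩
  unfold pvPolyA
  have hlen : PySem.List.len (ys ++ [z]) - 1 = (ys.length : Int) := by
    simp [PySem.List.len_eq]
  rw [hlen]
  rw [PySem.List.foldl_congr_mem _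
        (fun (dv : Int × Int) i =>
          (dv.1 - 1, dv.2 + x ^ dv.1.toNat * PySem.List.pyGetD (ys ++ [z]) i 0))
        (fun (dv : Int × Int) i =>
          (dv.1 - 1, dv.2 + x ^ dv.1.toNat * PySem.List.pyGetD ys i 0))
        ((ys.length : Int), 0)
        (by
          intro acc i hi
          rw [PySem.List.mem_pyRange_one] at hi
          have h1 : PySem.List.pyGetD (ys ++ [z]) i 0 = PySem.List.pyGetD ys i 0 := by
            rw [PySem.List.pyGetD_eq_getElem _ 0 hi.1 (by simp; omega),
                PySem.List.pyGetD_eq_getElem _ 0 hi.1 (by exact_mod_cast hi.2)]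
            exact List.getElem_append_left (by omega)
          simp only [h1])]
  rw [PySem.List.foldl_pyRange_zero_pyGetD' ys 0
        (fun (dv : Int × Int) c => (dv.1 - 1, dv.2 + x ^ dv.1.toNat * c)) ((ys.length : Int), 0)]
  show (List.foldl (fun (dv : Int × Int) c => (dv.1 - 1, dv.2 + x ^ dv.1.toNat * c))
          ((ys.length : Int), 0) ys).2 + _ = _
  rw [pv_polyA_fold x ys 0 _ rfl]
  have hlast : PySem.List.pyGetD (ys ++ [z]) ((ys.length : Int)) 0 = z := by
    rw [PySem.List.pyGetD_natCast]
    simp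
  rw [hlast, List.foldl_append]
  simp only [List.foldl_cons, List.foldl_nil]
  ring

theorem pv_polyA_one (coeffs : List Int) (hne : coeffs ≠ []) :
    pvPolyA coeffs 1 = coeffs.sum := by
  rw [pv_polyA_eq_horner coeffs hne 1]
  simp [List.sum_eq_foldl]

theorem pv_loopB_append :
    ∀ (fuel : Nat) (b h i : Int) (parts : List (List Char)),
      pvLoopB fuel b h i parts = parts ++ pvLoopB fuel b h i [] := by
  intro fuel
  induction fuel with
  | zero => intro b h i parts; simp [pvLoopB]
  | succ fuel ih =>
    intro b h i parts
    simp only [pvLoopB]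
    by_cases hp : h > 0
    · simp only [hp, if_pos]
      rw [ih _ _ _ (parts ++ _), ih _ _ _ ([] ++ _)]
      simp
    · simp [hp]

theorem pv_loopAB :
    ∀ (fuel : Nat) (b h i : Int) (cs : List Char),
      pvLoopA fuel b h i cs = cs ++ (pvLoopB fuel b h i []).flatMap (fun p => '+' :: p) := by
  intro fuel
  induction fuel with
  | zero => intro b h i cs; simp [pvLoopA, pvLoopB]
  | succ fuel ih =>
    intro b h i cs
    simp only [pvLoopA, pvLoopB]
    by_cases hp : h > 0
    · simp only [hp, if_pos]
      rw [ih]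
      conv_rhs => rw [pv_loopB_append]
      simp
    · simp [hp]

theorem pv_cons_flatMap_eq_join :
    ∀ (ps : List (List Char)) (p : List Char),
      p ++ ps.flatMap (fun q => '+' :: q) = PySem.Chars.join ['+'] (p :: ps) := by
  intro ps
  induction ps with
  | nil => intro p; simp [PySem.Chars.join_singleton]
  | cons q r ih =>
    intro p
    rw [PySem.Chars.join_cons_cons, ← ih q]
    simp

theorem pv_tail_flatMap (parts : List (List Char)) :
    (parts.flatMap (fun p => '+' :: p)).tail = PySem.Chars.join ['+'] parts := by
  cases parts with
  | nil => simp [PySem.Chars.join_nil]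
  | cons p ps => simp only [List.flatMap_cons, List.cons_append, List.tail_cons,
      ← pv_cons_flatMap_eq_join ps p]

-- ===== VERDICT (by name: the statement is the Claim_ definition above) =====

theorem mathemagician_spec : Claim_equal_mathemagician := by
  intro coeffs _ hpre
  unfold Spec_mathemagician mathemagician mathemagician_alt
  simp only [pv_polyA_one coeffs hpre.1, pv_polyA_eq_horner coeffs hpre.1 (coeffs.sum + 1)]
  rw [pv_loopAB, PySem.List.slice_from_one]
  simp only [List.nil_append]
  rw [pv_tail_flatMap]
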